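-- pv_equiv track=rewrite | github.com/ChrisHuie/agents-playground | src/agents_playground/github_release_agent.py | _has_aliases_context
-- ===== SOURCE A (Python) =====
-- def _has_aliases_context(patch: str) -> bool:
--     """Check if patch has aliases context (helpful for detecting alias list additions)."""
--     lines = patch.split('\n')
--     for i, line in enumerate(lines):
--         if 'aliases:' in line:
--             # Check if there are subsequent lines with list items
--             for j in range(i+1, min(i+10, len(lines))):
--                 if '+ -' in lines[j] or '+  -' in lines[j]:
--                     return True
--     return False
-- ===== SOURCE B (Python) =====
-- def _has_aliases_context(patch: str) -> bool:
--     """Check if patch has aliases context (helpful for detecting alias list additions)."""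
--     window = 0
--     for line in patch.split('\n'):
--         if window > 0 and ('+ -' in line or '+  -' in line):
--             return True
--         window = 9 if 'aliases:' in line else max(window - 1, 0)
--     return False
-- ===== Notes on version B (the rewrite author's own statement) =====
-- stated objective: simpler
-- what changed: Replaced the nested scan (for every 'aliases:' line, rescan the next up-to-9 lines by index) with a single linear pass that keeps an integer countdown window, checked before being re-armed.
import Mathlib
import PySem

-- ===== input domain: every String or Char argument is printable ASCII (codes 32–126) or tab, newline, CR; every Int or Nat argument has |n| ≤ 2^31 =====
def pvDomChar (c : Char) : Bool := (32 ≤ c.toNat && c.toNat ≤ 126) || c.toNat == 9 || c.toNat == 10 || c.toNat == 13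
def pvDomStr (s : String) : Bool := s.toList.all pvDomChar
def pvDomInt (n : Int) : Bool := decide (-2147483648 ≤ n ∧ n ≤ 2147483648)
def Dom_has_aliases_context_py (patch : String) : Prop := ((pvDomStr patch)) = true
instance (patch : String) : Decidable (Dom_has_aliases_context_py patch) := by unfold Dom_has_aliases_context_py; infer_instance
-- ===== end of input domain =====

-- B replaces A's nested index re-scan by one linear pass with a countdown window (simpler, one pass).

-- shared line predicates ('+ -' in line or '+  -' in line;  'aliases:' in line)
def pvMatch (l : String) : Bool := PySem.Str.isIn "+ -" l || PySem.Str.isIn "+  -" l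
def pvAlias (l : String) : Bool := PySem.Str.isIn "aliases:" l

-- ===== PORT A =====
-- inner loop: for j in range(i+1, min(i+10, len(lines))): if match: return True
def pvInnerA (lines : List String) (i : Int) : Bool :=
  (PySem.List.pyRange (i + 1) (min (i + 10) (lines.length : Int)) 1).any
    (fun j => pvMatch (PySem.List.pyGetD lines j ""))

-- outer loop over enumerate(lines) with early return
def pvOuterA (lines : List String) : List (Int × String) → Bool
  | [] => false
  | (i, line) :: rest =>
      if pvAlias line then
        (if pvInnerA lines i then true else pvOuterA lines rest)
      else pvOuterA lines rest

def has_aliases_context_py (patch : String) : Bool :=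
  -- split? is total here since the separator "\n" is nonempty
  let lines := (PySem.Str.split? patch "\n").getD []
  pvOuterA lines (PySem.List.enumerate lines 0)

-- ===== PORT B =====
-- single pass with countdown window (checked before re-arming); window = 9 if aliases else max(window-1,0)
def pvLoopB : List String → Nat → Bool
  | [], _ => false
  | l :: rest, w =>
      if w > 0 && pvMatch l then true
      else pvLoopB rest (if pvAlias l then 9 else w - 1)

def has_aliases_context_py_alt (patch : String) : Bool :=
  let lines := (PySem.Str.split? patch "\n").getD []
  pvLoopB lines 0

-- ===== PRECONDITION & SPEC =====
def Spec_has_aliases_context_py (patch : String) (out : Bool) : Prop := out = has_aliases_context_py_alt patch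
instance (patch : String) (out : Bool) : Decidable (Spec_has_aliases_context_py patch out) := by unfold Spec_has_aliases_context_py; infer_instance

-- ===== CLAIM (what is proved, stated in full; the proofs are below) =====
def Claim_equal_has_aliases_context_py : Prop := ∀ (patch : String), Dom_has_aliases_context_py patch → Spec_has_aliases_context_py patch (has_aliases_context_py patch)

-- ===== LEMMAS AND PROOFS =====

-- one step of A's outer loop, as a Boolean disjunction
theorem pvOuterA_cons (lines : List String) (i : Int) (line : String) (rest : List (Int × String)) :
    pvOuterA lines ((i, line) :: rest) = ((pvAlias line && pvInnerA lines i) || pvOuterA lines rest) := by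
  simp only [pvOuterA]
  by_cases h : pvAlias line = true <;> by_cases h2 : pvInnerA lines i = true <;> simp [h, h2]

-- one step of B's pass, as a Boolean disjunction
theorem pvLoopB_cons (l : String) (rest : List String) (w : Nat) :
    pvLoopB (l :: rest) w
      = ((decide (w > 0) && pvMatch l) || pvLoopB rest (if pvAlias l then 9 else w - 1)) := by
  simp only [pvLoopB]
  by_cases h : (decide (w > 0) && pvMatch l) = true <;> simp [h]

-- characterisation of A's inner loop
theorem pvInnerA_iff (lines : List String) (i : Nat) :
    pvInnerA lines (i : Int) = true ↔
      ∃ j : Nat, i + 1 ≤ j ∧ j < lines.length ∧ j ≤ i + 9 ∧ pvMatch (lines.getD j "") = true := by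
  simp only [pvInnerA, List.any_eq_true, PySem.List.mem_pyRange_one]
  constructor
  · rintro ⟨j, ⟨hj1, hj2⟩, hm⟩
    refine ⟨j.toNat, by omega, by omega, by omega, ?_⟩
    rw [show j = ((j.toNat : Nat) : Int) from by omega, PySem.List.pyGetD_natCast] at hm
    exact hm
  · rintro ⟨j, h1, h2, h3, hm⟩
    refine ⟨(j : Int), ⟨by omega, by omega⟩, ?_⟩
    rw [PySem.List.pyGetD_natCast]
    exact hm

-- characterisation of A's outer loop over enumerate (generalized over the start index)
theorem pvOuterA_iff (lines : List String) (ls : List String) (s : Int) :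
    pvOuterA lines (PySem.List.enumerate ls s) = true ↔
      ∃ t : Nat, t < ls.length ∧ pvAlias (ls.getD t "") = true ∧ pvInnerA lines (s + t) = true := by
  induction ls generalizing s with
  | nil => simp [PySem.List.enumerate_nil, pvOuterA]
  | cons l rest ih =>
    rw [PySem.List.enumerate_cons, pvOuterA_cons, Bool.or_eq_true, Bool.and_eq_true, ih]
    constructor
    · rintro (⟨ha, hi⟩ | ⟨t, h1, h2, h3⟩)
      · exact ⟨0, by simp, by simpa using ha, by simpa using hi⟩
      · refine ⟨t + 1, by simpa using h1, by simpa using h2, ?_⟩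
        have : s + ((t + 1 : Nat) : Int) = s + 1 + (t : Int) := by push_cast; ring
        rw [this]; exact h3
    · rintro ⟨t, h1, h2, h3⟩
      cases t with
      | zero => exact Or.inl ⟨by simpa using h2, by simpa using h3⟩
      | succ t' =>
        refine Or.inr ⟨t', by simpa using h1, by simpa using h2, ?_⟩
        have : s + 1 + (t' : Int) = s + ((t' + 1 : Nat) : Int) := by push_cast; ring
        rw [this]; exact h3

-- characterisation of B's single pass, for any window w ≤ 9
theorem pvLoopB_iff (ls : List String) (w : Nat) (hw : w ≤ 9) :
    pvLoopB ls w = true ↔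
      ∃ j : Nat, j < ls.length ∧ pvMatch (ls.getD j "") = true ∧
        (j < w ∨ ∃ k : Nat, k < j ∧ pvAlias (ls.getD k "") = true ∧ j ≤ k + 9) := by
  induction ls generalizing w with
  | nil => simp [pvLoopB]
  | cons l rest ih =>
    have hw' : (if pvAlias l then 9 else w - 1) ≤ 9 := by split <;> omega
    rw [pvLoopB_cons, Bool.or_eq_true, Bool.and_eq_true, ih _ hw']
    constructor
    · rintro (⟨hp, hm⟩ | ⟨j, h1, h2, h3⟩)
      · exact ⟨0, by simp, by simpa using hm, Or.inl (by simpa using hp)⟩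
      · refine ⟨j + 1, by simpa using h1, by simpa using h2, ?_⟩
        rcases h3 with h3 | ⟨k, hk1, hk2, hk3⟩
        · by_cases ha : pvAlias l = true
          · refine Or.inr ⟨0, by omega, by simpa using ha, ?_⟩
            rw [ha] at h3; simp at h3; omega
          · refine Or.inl ?_
            rw [Bool.not_eq_true] at ha; rw [ha] at h3; simp at h3; omega
        · exact Or.inr ⟨k + 1, by omega, by simpa using hk2, by omega⟩
    · rintro ⟨j, h1, h2, h3⟩
      cases j with
      | zero =>
        rcases h3 with h3 | ⟨k, hk, _⟩
        · exact Or.inl ⟨by simpa using h3, by simpa using h2⟩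
        · omega
      | succ j' =>
        refine Or.inr ⟨j', by simpa using h1, by simpa using h2, ?_⟩
        rcases h3 with h3 | ⟨k, hk1, hk2, hk3⟩
        · by_cases ha : pvAlias l = true
          · rw [ha]; simp; exact Or.inl (by omega)
          · rw [Bool.not_eq_true] at ha; rw [ha]; simp; exact Or.inl (by omega)
        · cases k with
          | zero =>
            have ha : pvAlias l = true := by simpa using hk2
            rw [ha]; simp; exact Or.inl (by omega)
          | succ k' =>
            exact Or.inr ⟨k', by omega, by simpa using hk2, by omega⟩

-- the two passes agree on any list of lines
theorem pv_main (lines : List String) :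
    pvOuterA lines (PySem.List.enumerate lines 0) = pvLoopB lines 0 := by
  rw [Bool.eq_iff_iff, pvOuterA_iff lines lines 0, pvLoopB_iff lines 0 (by omega)]
  constructor
  · rintro ⟨t, h1, h2, h3⟩
    have h3' : pvInnerA lines ((t : Nat) : Int) = true := by simpa using h3
    rcases (pvInnerA_iff lines t).mp h3' with ⟨j, hj1, hj2, hj3, hj4⟩
    exact ⟨j, hj2, hj4, Or.inr ⟨t, by omega, h2, by omega⟩⟩
  · rintro ⟨j, h1, h2, h3⟩
    rcases h3 with h3 | ⟨k, hk1, hk2, hk3⟩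
    · omega
    · refine ⟨k, by omega, hk2, ?_⟩
      have : pvInnerA lines ((k : Nat) : Int) = true :=
        (pvInnerA_iff lines k).mpr ⟨j, by omega, h1, by omega, h2⟩
      simpa using this

-- ===== VERDICT (by name: the statement is the Claim_ definition above) =====
theorem has_aliases_context_py_spec : Claim_equal_has_aliases_context_py := by
  intro patch _
  unfold Spec_has_aliases_context_py has_aliases_context_py has_aliases_context_py_alt
  exact pv_main _
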